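-- pv_equiv track=rewrite | github.com/weiyangzen/awesome_algorithms | Algorithms/数学-组合数学-0552-Stirling数/demo.py | stirling_first_signed_table
-- ===== SOURCE A (Python) =====
-- from typing import List
--
-- Table = List[List[int]]
--
-- def _validate_n_max(n_max: int) -> None:
--     if not isinstance(n_max, int):
--         raise TypeError(f"n_max must be int, got {type(n_max).__name__}")
--     if n_max < 0:
--         raise ValueError("n_max must be non-negative")
--
-- def stirling_first_signed_table(n_max: int) -> Table:
--     """Return s(n, k) for 0 <= n, k <= n_max.
--
--     s(n, k) is the signed Stirling number of the first kind.
--     Recurrence: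
--         s(0,0)=1
--         s(n,k)=s(n-1,k-1)-(n-1)s(n-1,k)
--     """
--     _validate_n_max(n_max)
--     s = [[0] * (n_max + 1) for _ in range(n_max + 1)]
--     s[0][0] = 1
--
--     for n in range(1, n_max + 1):
--         for k in range(1, n + 1):
--             s[n][k] = s[n - 1][k - 1] - (n - 1) * s[n - 1][k]
--     return s
-- ===== SOURCE B (Python) =====
-- def stirling_first_signed_table(n_max):
--     """Row n of the signed table holds the coefficients of the falling
--     factorial P_n(x) = x(x-1)...(x-(n-1)).  Since P_n(x) = x * P_{n-1}(x-1),
--     each row is obtained from the previous one by a binomial (Taylor-shift)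
--     transform: s(n, m+1) = sum_k s(n-1, k) * (-1)**(k-m) * C(k, m), with
--     Pascal's triangle supplying the binomial coefficients."""
--     if not isinstance(n_max, int):
--         raise TypeError(f"n_max must be int, got {type(n_max).__name__}")
--     if n_max < 0:
--         raise ValueError("n_max must be non-negative")
--     C = [[1]]
--     for k in range(1, n_max + 1):
--         prev = C[-1]
--         C.append([1] + [prev[m - 1] + prev[m] for m in range(1, k)] + [1])
--     table = [[1] + [0] * n_max]
--     for n in range(1, n_max + 1):
--         r = table[-1]
--         table.append([0]
--                      + [sum(r[k] * (-1) ** (k - m) * C[k][m] for k in range(m, n))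
--                         for m in range(n)]
--                      + [0] * (n_max - n))
--     return table
-- ===== Notes on version B (the rewrite author's own statement) =====
-- stated objective: alternative
-- what changed: B computes each row as the coefficients of the falling factorial x*P(x-1): a binomial (Taylor-shift) transform of the previous row over a precomputed Pascal triangle, instead of A's in-place two-term Stirling recurrence s[n][k]=s[n-1][k-1]-(n-1)*s[n-1][k].
import Mathlib
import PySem

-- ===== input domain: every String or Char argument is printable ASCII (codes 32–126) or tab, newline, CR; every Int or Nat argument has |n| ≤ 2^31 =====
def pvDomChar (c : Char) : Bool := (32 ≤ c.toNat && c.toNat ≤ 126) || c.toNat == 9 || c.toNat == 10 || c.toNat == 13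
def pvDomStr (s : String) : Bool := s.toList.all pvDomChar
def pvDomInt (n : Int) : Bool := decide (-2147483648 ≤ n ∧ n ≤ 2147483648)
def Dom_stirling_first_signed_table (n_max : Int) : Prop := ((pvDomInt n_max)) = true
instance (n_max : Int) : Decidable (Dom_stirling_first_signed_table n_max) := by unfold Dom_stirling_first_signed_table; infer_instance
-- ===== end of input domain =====

-- B replaces A's two-term Stirling recurrence by a different algorithm: row n is the
-- coefficient list of the falling factorial x·P_{n-1}(x-1), produced from the previous row
-- by a binomial (Taylor-shift) transform over Pascal's triangle (objective: alternative).

-- ===== PORT A =====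
-- literal transliteration of A: preallocated (n_max+1)x(n_max+1) zero matrix, s[0][0]=1,
-- then in-place s[n][k] = s[n-1][k-1] - (n-1)*s[n-1][k] for 1<=k<=n.
-- the 'if n_max < 0' guard is for totality only: Python raises ValueError there (outside Pre_).
def stirling_first_signed_table (n_max : Int) : List (List Int) :=
  if n_max < 0 then [] else
  let s0 : List (List Int) :=
    List.replicate (n_max + 1).toNat (List.replicate (n_max + 1).toNat 0)
  let s1 := PySem.List.pySetD s0 0 (PySem.List.pySetD (PySem.List.pyGetD s0 0 []) 0 1)
  (PySem.List.pyRange 1 (n_max + 1) 1).foldl (fun s n =>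
    (PySem.List.pyRange 1 (n + 1) 1).foldl (fun s k =>
      PySem.List.pySetD s n (PySem.List.pySetD (PySem.List.pyGetD s n []) k
        (PySem.List.pyGetD (PySem.List.pyGetD s (n - 1) []) (k - 1) 0
          - (n - 1) * PySem.List.pyGetD (PySem.List.pyGetD s (n - 1) []) k 0))) s) s1

-- ===== PORT B =====
-- literal transliteration of Source B: Pascal's triangle C built first, then each row from the
-- previous one by the binomial transform  row[m+1] = sum_{k=m}^{n-1} r[k]*(-1)^(k-m)*C[k][m].
-- Python's (-1)**(k-m) is ported as (-1)^(k-m).toNat — exact, since k ranges over [m, n).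
def stirling_first_signed_table_alt (n_max : Int) : List (List Int) :=
  if n_max < 0 then [] else
  let C := (PySem.List.pyRange 1 (n_max + 1) 1).foldl (fun C k =>
    let prev := PySem.List.pyGetD C (-1) ([] : List Int)
    C ++ [[(1 : Int)] ++ (PySem.List.pyRange 1 k 1).map (fun m =>
        PySem.List.pyGetD prev (m - 1) 0 + PySem.List.pyGetD prev m 0) ++ [1]])
    [[(1 : Int)]]
  (PySem.List.pyRange 1 (n_max + 1) 1).foldl (fun table n =>
    let r := PySem.List.pyGetD table (-1) ([] : List Int)
    table ++ [[(0 : Int)] ++ (PySem.List.pyRange 0 n 1).map (fun m =>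
        (PySem.List.pyRange m n 1).foldl (fun acc k =>
          acc + PySem.List.pyGetD r k 0 * (-1) ^ (k - m).toNat
            * PySem.List.pyGetD (PySem.List.pyGetD C k ([] : List Int)) m 0) 0)
      ++ List.replicate (n_max - n).toNat 0])
    [(1 : Int) :: List.replicate n_max.toNat 0]

-- ===== PRECONDITION & SPEC =====
-- Pre_ excludes exactly n_max < 0, where Python A raises ValueError (and B does too).
def Pre_stirling_first_signed_table (n_max : Int) : Prop := 0 ≤ n_max
instance (n_max : Int) : Decidable (Pre_stirling_first_signed_table n_max) := by
  unfold Pre_stirling_first_signed_table; infer_instance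
def pvWitness_stirling_first_signed_table : Int := 3

def Spec_stirling_first_signed_table (n_max : Int) (out : List (List Int)) : Prop := out = stirling_first_signed_table_alt n_max
instance (n_max : Int) (out : List (List Int)) : Decidable (Spec_stirling_first_signed_table n_max out) := by unfold Spec_stirling_first_signed_table; infer_instance

-- ===== CLAIM (what is proved, stated in full; the proofs are below) =====
def Claim_equal_stirling_first_signed_table : Prop := ∀ (n_max : Int), Dom_stirling_first_signed_table n_max → Pre_stirling_first_signed_table n_max → Spec_stirling_first_signed_table n_max (stirling_first_signed_table n_max)

-- ===== LEMMAS AND PROOFS =====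

-- signed Stirling numbers of the first kind (mathematical reference value)
def pvS : Nat → Nat → Int
  | 0, 0 => 1
  | 0, _ + 1 => 0
  | _ + 1, 0 => 0
  | n + 1, k + 1 => pvS n k - (n : Int) * pvS n (k + 1)

def pvSigRow (N n : Nat) : List Int := (List.range (N + 1)).map (fun k => pvS n k)
-- A's matrix after processing outer rows 1..m
def pvM (N m : Nat) : List (List Int) :=
  (List.range (N + 1)).map (fun i => if i ≤ m then pvSigRow N i else List.replicate (N + 1) 0)
-- A's row n after the inner loop has run k = 1..j
def pvProw (N n j : Nat) : List Int :=
  (List.range (N + 1)).map (fun k => if 1 ≤ k ∧ k ≤ j then pvS n k else 0)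

lemma pvS_big : ∀ n k, n < k → pvS n k = 0 := by
  intro n
  induction n with
  | zero => intro k hk; match k, hk with | k + 1, _ => rfl
  | succ n ih =>
    intro k hk
    match k, hk with
    | k + 1, hk =>
      show pvS n k - (n : Int) * pvS n (k + 1) = 0
      rw [ih k (by omega), ih (k + 1) (by omega)]; ring

lemma pvS_zero_left (n : Nat) (h : 1 ≤ n) : pvS n 0 = 0 := by
  match n, h with | n + 1, _ => rfl

lemma pvS_step (n k : Nat) (h : 1 ≤ n) :
    pvS n (k + 1) = pvS (n - 1) k - ((n - 1 : Nat) : Int) * pvS (n - 1) (k + 1) := by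
  match n, h with
  | n + 1, _ => show pvS n k - (n : Int) * pvS n (k + 1) = _; simp

lemma getD_set_ne {α : Type} (s : List α) (n i : Nat) (r d : α) (h : i ≠ n) :
    (s.set n r).getD i d = s.getD i d := by
  by_cases hi : i < s.length
  · rw [List.getD_eq_getElem _ _ (by simpa using hi), List.getD_eq_getElem _ _ hi,
      List.getElem_set_ne (by omega)]
  · rw [List.getD_eq_default _ _ (by simpa using Nat.le_of_not_lt hi),
      List.getD_eq_default _ _ (Nat.le_of_not_lt hi)]

lemma getD_set_self {α : Type} (s : List α) (n : Nat) (r d : α) (h : n < s.length) :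
    (s.set n r).getD n d = r := by
  rw [List.getD_eq_getElem _ _ (by simpa using h)]
  simp

lemma set_eq_self {α : Type} (s : List α) (n : Nat) (r : α) (h : n < s.length)
    (hr : s[n] = r) : s.set n r = s := by
  apply List.ext_getElem
  · simp
  · intro i h1 h2
    rw [List.getElem_set]
    split
    · rename_i he; subst he; exact hr.symm
    · rfl

lemma pvProw_zero (N n : Nat) : pvProw N n 0 = List.replicate (N + 1) 0 := by
  apply List.ext_getElem
  · simp [pvProw]
  · intro i h1 h2
    simp only [pvProw, List.getElem_map, List.getElem_range, List.getElem_replicate]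
    split
    · omega
    · rfl

lemma length_pvM (N m : Nat) : (pvM N m).length = N + 1 := by simp [pvM]

lemma pvM_getD_le (N m i : Nat) (hi : i ≤ N) (him : i ≤ m) :
    (pvM N m).getD i [] = pvSigRow N i := by
  rw [List.getD_eq_getElem _ _ (by simp [length_pvM]; omega)]
  simp [pvM, him]

lemma pvSigRow_getD (N n k : Nat) (hk : k ≤ N) : (pvSigRow N n).getD k 0 = pvS n k := by
  rw [List.getD_eq_getElem _ _ (by simp [pvSigRow]; omega)]
  simp [pvSigRow]

lemma pvProw_set (N n j : Nat) (hj : j + 1 ≤ n) (hn : n ≤ N) :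
    (pvProw N n j).set (j + 1) (pvS n (j + 1)) = pvProw N n (j + 1) := by
  apply List.ext_getElem
  · simp [pvProw]
  · intro i h1 h2
    simp only [pvProw, List.length_map, List.length_range] at h1
    by_cases hij : i = j + 1
    · subst hij
      simp only [List.getElem_set, if_pos rfl]
      simp only [pvProw, List.getElem_map, List.getElem_range]
      have : 1 ≤ j + 1 ∧ j + 1 ≤ j + 1 := by omega
      simp [this]
    · rw [List.getElem_set_ne (by omega)]
      simp only [pvProw, List.getElem_map, List.getElem_range]
      have : (1 ≤ i ∧ i ≤ j) ↔ (1 ≤ i ∧ i ≤ j + 1) := by omega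
      simp [this]

-- A's inner loop: starting from a matrix whose row n is pvProw N n 0 ... invariant
lemma innerA (N n : Nat) (hn1 : 1 ≤ n) (hnN : n ≤ N)
    (s : List (List Int)) (hlen : s.length = N + 1)
    (hprev : s.getD (n - 1) [] = pvSigRow N (n - 1)) :
    ∀ j, j ≤ n →
    ((PySem.List.pyRange 1 ((n : Int) + 1) 1).take j).foldl (fun s k =>
      PySem.List.pySetD s (n : Int) (PySem.List.pySetD (PySem.List.pyGetD s (n : Int) []) k
        (PySem.List.pyGetD (PySem.List.pyGetD s ((n : Int) - 1) []) (k - 1) 0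
          - ((n : Int) - 1) * PySem.List.pyGetD (PySem.List.pyGetD s ((n : Int) - 1) []) k 0)))
      (s.set n (pvProw N n 0)) = s.set n (pvProw N n j) := by
  intro j
  induction j with
  | zero => intro _; rfl
  | succ j ih =>
    intro hj
    have htake : (PySem.List.pyRange 1 ((n : Int) + 1) 1).take (j + 1)
        = (PySem.List.pyRange 1 ((n : Int) + 1) 1).take j ++ [(1 : Int) + (j : Nat)] := by
      rw [List.take_succ, PySem.List.getElem?_pyRange_one]
      rw [if_pos (by omega)]
      rfl
    rw [htake, List.foldl_append, ih (by omega)]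
    simp only [List.foldl_cons, List.foldl_nil]
    have e1 : (1 : Int) + (j : Nat) = ((j + 1 : Nat) : Int) := by push_cast; ring
    have e2 : (n : Int) - 1 = ((n - 1 : Nat) : Int) := by omega
    have e3 : ((j + 1 : Nat) : Int) - 1 = ((j : Nat) : Int) := by push_cast; ring
    rw [e1, e2, e3]
    simp only [PySem.List.pyGetD_natCast, PySem.List.pySetD_natCast]
    rw [getD_set_ne s (n := n) (i := n - 1) _ _ (by omega), hprev,
      getD_set_self s n _ [] (by omega),
      pvSigRow_getD N (n - 1) j (by omega), pvSigRow_getD N (n - 1) (j + 1) (by omega),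
      ← pvS_step n j hn1, pvProw_set N n j (by omega) hnN, List.set_set]

lemma outerA (N : Nat) : ∀ m, m ≤ N →
    (PySem.List.pyRange 1 ((m : Int) + 1) 1).foldl (fun s n =>
      (PySem.List.pyRange 1 (n + 1) 1).foldl (fun s k =>
        PySem.List.pySetD s n (PySem.List.pySetD (PySem.List.pyGetD s n []) k
          (PySem.List.pyGetD (PySem.List.pyGetD s (n - 1) []) (k - 1) 0
            - (n - 1) * PySem.List.pyGetD (PySem.List.pyGetD s (n - 1) []) k 0))) s)
      (pvM N 0) = pvM N m := by
  intro m
  induction m with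
  | zero =>
    intro _
    rw [PySem.List.pyRange_one_eq_nil (by norm_num)]
    rfl
  | succ m ih =>
    intro hm
    have ec : ((m + 1 : Nat) : Int) = (m : Int) + 1 := by push_cast; ring
    rw [ec, PySem.List.pyRange_one_succ_right (by omega), List.foldl_append, ih (by omega)]
    simp only [List.foldl_cons, List.foldl_nil]
    rw [← ec]
    have hstart : pvM N m = (pvM N m).set (m + 1) (pvProw N (m + 1) 0) := by
      rw [pvProw_zero]
      exact (set_eq_self _ _ _ (by rw [length_pvM]; omega)
        (by simp [pvM])).symm
    have hfull : PySem.List.pyRange 1 (((m + 1 : Nat) : Int) + 1)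
        = (PySem.List.pyRange 1 (((m + 1 : Nat) : Int) + 1)).take (m + 1) := by
      rw [List.take_of_length_le (by rw [PySem.List.length_pyRange_one]; omega)]
    rw [hfull]
    conv_lhs => rw [hstart]
    rw [innerA N (m + 1) (by omega) (by omega) (pvM N m) (length_pvM N m)
      (by simpa using pvM_getD_le N m m (by omega) (le_refl m)) (m + 1) (le_refl _)]
    have hrow : pvProw N (m + 1) (m + 1) = pvSigRow N (m + 1) := by
      apply List.ext_getElem
      · simp [pvProw, pvSigRow]
      · intro k h1 h2
        simp only [pvProw, pvSigRow, List.getElem_map, List.getElem_range]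
        simp only [pvProw, List.length_map, List.length_range] at h1
        split
        · rfl
        · rename_i hcond
          rcases Nat.lt_or_ge k 1 with hk | hk
          · interval_cases k
            exact (pvS_zero_left (m + 1) (by omega)).symm
          · exact (pvS_big (m + 1) k (by omega)).symm
    rw [hrow]
    apply List.ext_getElem
    · simp [pvM]
    · intro i h1 h2
      simp only [length_pvM, List.length_set] at h1 h2
      rw [List.getElem_set]
      simp only [pvM, List.getElem_map, List.getElem_range]
      split
      · rename_i he; rw [if_pos (by omega)]; rw [← he]
      · rename_i he
        have : (i ≤ m) ↔ (i ≤ m + 1) := by omega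
        simp [this]

lemma portA_eq (N : Nat) :
    stirling_first_signed_table (N : Int) = pvM N N := by
  have hs1 : PySem.List.pySetD
      (List.replicate (((N : Int) + 1).toNat) (List.replicate (((N : Int) + 1).toNat) (0 : Int))) 0
      (PySem.List.pySetD (PySem.List.pyGetD
        (List.replicate (((N : Int) + 1).toNat) (List.replicate (((N : Int) + 1).toNat) (0 : Int))) 0 []) 0 1)
      = pvM N 0 := by
    have ht : ((N : Int) + 1).toNat = N + 1 := by omega
    rw [ht]
    rw [PySem.List.pyGetD_zero]
    rw [PySem.List.pySetD_of_nonneg _ _ (by norm_num),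
        PySem.List.pySetD_of_nonneg _ _ (by norm_num)]
    simp only [Int.toNat_zero]
    rw [List.getD_eq_getElem _ _ (by simp), List.getElem_replicate]
    apply List.ext_getElem
    · simp [pvM]
    · intro i h1 h2
      rw [List.getElem_set]
      simp only [pvM, List.getElem_map, List.getElem_range, List.getElem_replicate]
      split
      · rename_i he
        subst he
        rw [if_pos (by omega)]
        apply List.ext_getElem
        · simp [pvSigRow]
        · intro k h3 h4
          rw [List.getElem_set]
          simp only [pvSigRow, List.getElem_map, List.getElem_range, List.getElem_replicate]
          split
          · rename_i hk; subst hk; rfl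
          · rename_i hk
            exact (pvS_big 0 k (by omega)).symm
      · rename_i he
        rw [if_neg (by omega)]
  show (if (N : Int) < 0 then _ else _) = _
  rw [if_neg (by omega)]
  simp only []
  rw [hs1]
  exact outerA N N (le_refl N)

-- ===== B-side: Pascal's triangle and the binomial-transform identity =====

def pvCRow (k : Nat) : List Int := (List.range (k + 1)).map (fun m => (Nat.choose k m : Int))

lemma pvCRow_getD (k m : Nat) (h : m ≤ k) : (pvCRow k).getD m 0 = (Nat.choose k m : Int) := by
  rw [List.getD_eq_getElem _ _ (by simp [pvCRow]; omega)]
  simp [pvCRow]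

lemma pascal_step (K : Nat) (hK : 1 ≤ K) :
    [(1 : Int)] ++ (PySem.List.pyRange 1 ((K : Nat) : Int) 1).map (fun m =>
        PySem.List.pyGetD (pvCRow (K - 1)) (m - 1) 0 + PySem.List.pyGetD (pvCRow (K - 1)) m 0)
      ++ [1] = pvCRow K := by
  rw [PySem.List.pyRange_one]
  have ht : (((K : Nat) : Int) - 1).toNat = K - 1 := by omega
  rw [ht, List.map_map]
  have hmid : (List.range (K - 1)).map ((fun m =>
        PySem.List.pyGetD (pvCRow (K - 1)) (m - 1) 0 + PySem.List.pyGetD (pvCRow (K - 1)) m 0)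
        ∘ (fun k : Nat => (1 : Int) + k))
      = (List.range (K - 1)).map (fun j => (Nat.choose K (j + 1) : Int)) := by
    apply List.map_congr_left
    intro j hj
    rw [List.mem_range] at hj
    show PySem.List.pyGetD (pvCRow (K - 1)) ((1 : Int) + j - 1) 0
        + PySem.List.pyGetD (pvCRow (K - 1)) ((1 : Int) + j) 0 = _
    have e1 : (1 : Int) + (j : Nat) - 1 = ((j : Nat) : Int) := by omega
    have e2 : (1 : Int) + (j : Nat) = ((j + 1 : Nat) : Int) := by push_cast; ring
    rw [e1, e2, PySem.List.pyGetD_natCast, PySem.List.pyGetD_natCast,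
      pvCRow_getD (K - 1) j (by omega), pvCRow_getD (K - 1) (j + 1) (by omega)]
    have hk : K = (K - 1) + 1 := by omega
    rw [hk, Nat.choose_succ_succ]
    push_cast
    ring
  rw [hmid]
  have h1 : List.range (K + 1) = 0 :: (List.range K).map (· + 1) := by rw [List.range_succ_eq_map]
  have h2 : List.range K = List.range (K - 1) ++ [K - 1] := by
    conv_lhs => rw [show K = (K - 1) + 1 by omega]
    rw [List.range_succ]
  rw [pvCRow, h1, List.map_cons, h2, List.map_append, List.map_append, List.map_map]
  simp [Nat.choose_self, show K - 1 + 1 = K from by omega]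

-- the Pascal fold builds the rows 0..m of Pascal's triangle
lemma pascalC (N : Nat) : ∀ m, m ≤ N →
    (PySem.List.pyRange 1 ((m : Int) + 1) 1).foldl (fun C k =>
      C ++ [[(1 : Int)] ++ (PySem.List.pyRange 1 k 1).map (fun m =>
          PySem.List.pyGetD (PySem.List.pyGetD C (-1) ([] : List Int)) (m - 1) 0
            + PySem.List.pyGetD (PySem.List.pyGetD C (-1) ([] : List Int)) m 0) ++ [1]])
      [[(1 : Int)]] = (List.range (m + 1)).map pvCRow := by
  intro m
  induction m with
  | zero =>
    intro _
    rw [PySem.List.pyRange_one_eq_nil (by norm_num)]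
    simp [pvCRow]
  | succ m ih =>
    intro hm
    have ec : ((m + 1 : Nat) : Int) = (m : Int) + 1 := by push_cast; ring
    rw [ec, PySem.List.pyRange_one_succ_right (by omega), List.foldl_append, ih (by omega)]
    simp only [List.foldl_cons, List.foldl_nil]
    have hp : PySem.List.pyGetD ((List.range (m + 1)).map pvCRow) (-1) ([] : List Int)
        = pvCRow m := by
      rw [List.range_succ, List.map_append]
      exact PySem.List.pyGetD_neg_one_append_singleton _ _ _
    have hs := pascal_step (m + 1) (by omega)
    simp only [Nat.add_sub_cancel] at hs
    rw [hp, ← ec, hs]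
    rw [List.range_succ (n := m + 1), List.map_append]
    rfl

-- the binomial transform of row n of signed Stirling numbers
def pvT (n m : Nat) : Int :=
  ∑ k ∈ Finset.range (n + 1), pvS n k * (-1 : Int) ^ (k - m) * (Nat.choose k m : Int)

lemma mul_pvS_zero (n : Nat) : (n : Int) * pvS n 0 = 0 := by
  match n with
  | 0 => simp [pvS]
  | n + 1 => rw [pvS_zero_left (n + 1) (by omega)]; ring

lemma pvT_eq : ∀ n m, pvT n m = pvS (n + 1) (m + 1) := by
  intro n
  induction n with
  | zero =>
    intro m
    unfold pvT
    rw [Finset.sum_range_one]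
    match m with
    | 0 => show pvS 0 0 * _ * _ = pvS 1 1; simp [pvS]
    | m + 1 =>
      rw [Nat.choose_eq_zero_of_lt (by omega)]
      show pvS 0 0 * (-1 : Int) ^ (0 - (m + 1)) * ((0 : Nat) : Int) = pvS 1 (m + 2)
      rw [pvS_big 1 (m + 2) (by omega)]
      simp
  | succ n ih =>
    intro m
    unfold pvT
    rw [Finset.sum_range_succ']
    have hf0 : pvS (n + 1) 0 * (-1 : Int) ^ (0 - m) * (Nat.choose 0 m : Int) = 0 := by
      rw [pvS_zero_left (n + 1) (by omega)]; ring
    rw [hf0, add_zero]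
    have hstep : ∀ i, pvS (n + 1) (i + 1) = pvS n i - (n : Int) * pvS n (i + 1) := fun i => rfl
    match m with
    | 0 =>
      have hterm : ∀ i ∈ Finset.range (n + 1),
          pvS (n + 1) (i + 1) * (-1 : Int) ^ (i + 1 - 0) * (Nat.choose (i + 1) 0 : Int)
            = -(pvS n i * (-1 : Int) ^ (i - 0) * (Nat.choose i 0 : Int))
              + (n : Int) * (pvS n (i + 1) * (-1 : Int) ^ i) := by
        intro i _
        rw [hstep i, Nat.choose_zero_right, Nat.choose_zero_right]
        simp [pow_succ]
        ring
      rw [Finset.sum_congr rfl hterm, Finset.sum_add_distrib, Finset.sum_neg_distrib,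
        ← Finset.mul_sum]
      have hS2 : ∑ i ∈ Finset.range (n + 1), pvS n (i + 1) * (-1 : Int) ^ i
          = pvS n 0 - pvT n 0 := by
        have e1 : pvT n 0 = ∑ k ∈ Finset.range (n + 1), pvS n k * (-1 : Int) ^ k := by
          unfold pvT; apply Finset.sum_congr rfl; intro k _; simp
        have e2 : ∑ k ∈ Finset.range (n + 2), pvS n k * (-1 : Int) ^ k
            = ∑ k ∈ Finset.range (n + 1), pvS n k * (-1 : Int) ^ k := by
          rw [Finset.sum_range_succ, pvS_big n (n + 1) (by omega)]; ring_nf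
        have e3 := Finset.sum_range_succ' (fun k => pvS n k * (-1 : Int) ^ k) (n + 1)
        have e4 : ∀ i, pvS n (i + 1) * (-1 : Int) ^ (i + 1)
            = -(pvS n (i + 1) * (-1 : Int) ^ i) := by intro i; rw [pow_succ]; ring
        calc ∑ i ∈ Finset.range (n + 1), pvS n (i + 1) * (-1 : Int) ^ i
            = -∑ i ∈ Finset.range (n + 1), pvS n (i + 1) * (-1 : Int) ^ (i + 1) := by
              rw [← Finset.sum_neg_distrib]
              apply Finset.sum_congr rfl; intro i _; rw [e4]; ring
          _ = -(∑ k ∈ Finset.range (n + 2), pvS n k * (-1 : Int) ^ k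
                - pvS n 0 * (-1 : Int) ^ 0) := by rw [e3]; ring_nf
          _ = pvS n 0 - pvT n 0 := by rw [e2, ← e1]; ring
      rw [hS2]
      have hT : pvT n 0 = pvS (n + 1) 1 := ih 0
      rw [hT, mul_sub, mul_pvS_zero]
      have hd : pvS (n + 2) 1 = pvS (n + 1) 0 - ((n + 1 : Nat) : Int) * pvS (n + 1) 1 := rfl
      rw [hd, pvS_zero_left (n + 1) (by omega)]
      have e5 : pvT n 0
          = ∑ i ∈ Finset.range (n + 1), pvS n i * (-1 : Int) ^ (i - 0) * (Nat.choose i 0 : Int) := rfl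
      rw [← e5, hT]
      push_cast
      ring
    | m + 1 =>
      have hterm : ∀ i ∈ Finset.range (n + 1),
          pvS (n + 1) (i + 1) * (-1 : Int) ^ (i + 1 - (m + 1)) * (Nat.choose (i + 1) (m + 1) : Int)
            = (pvS n i * (-1 : Int) ^ (i - m) * (Nat.choose i m : Int)
               + pvS n i * (-1 : Int) ^ (i - m) * (Nat.choose i (m + 1) : Int))
              - (n : Int) * (pvS n (i + 1) * (-1 : Int) ^ (i + 1 - (m + 1))
                  * (Nat.choose (i + 1) (m + 1) : Int)) := by
        intro i _
        rw [hstep i, Nat.succ_sub_succ, Nat.choose_succ_succ]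
        push_cast
        ring
      rw [Finset.sum_congr rfl hterm, Finset.sum_sub_distrib, Finset.sum_add_distrib,
        ← Finset.mul_sum]
      have hP1 : ∑ i ∈ Finset.range (n + 1),
          pvS n i * (-1 : Int) ^ (i - m) * (Nat.choose i m : Int) = pvS (n + 1) (m + 1) := ih m
      have hP2 : ∑ i ∈ Finset.range (n + 1),
          pvS n i * (-1 : Int) ^ (i - m) * (Nat.choose i (m + 1) : Int) = -pvT n (m + 1) := by
        unfold pvT
        rw [← Finset.sum_neg_distrib]
        apply Finset.sum_congr rfl
        intro i _
        by_cases hi : i ≤ m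
        · rw [Nat.choose_eq_zero_of_lt (by omega)]
          push_cast; ring
        · have e : i - m = (i - (m + 1)) + 1 := by omega
          rw [e, pow_succ]
          ring
      have hP3 : ∑ i ∈ Finset.range (n + 1),
          pvS n (i + 1) * (-1 : Int) ^ (i + 1 - (m + 1)) * (Nat.choose (i + 1) (m + 1) : Int)
          = pvT n (m + 1) := by
        have e3 := Finset.sum_range_succ'
          (fun k => pvS n k * (-1 : Int) ^ (k - (m + 1)) * (Nat.choose k (m + 1) : Int)) (n + 1)
        have h0 : pvS n 0 * (-1 : Int) ^ (0 - (m + 1)) * (Nat.choose 0 (m + 1) : Int) = 0 := by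
          rw [Nat.choose_eq_zero_of_lt (by omega)]; push_cast; ring
        have htop : pvS n (n + 1) * (-1 : Int) ^ (n + 1 - (m + 1))
            * (Nat.choose (n + 1) (m + 1) : Int) = 0 := by
          rw [pvS_big n (n + 1) (by omega)]; ring
        have e4 : ∑ k ∈ Finset.range (n + 2),
            pvS n k * (-1 : Int) ^ (k - (m + 1)) * (Nat.choose k (m + 1) : Int)
            = pvT n (m + 1) := by
          rw [Finset.sum_range_succ, htop, add_zero]; rfl
        rw [e4, h0, add_zero] at e3
        exact e3.symm
      rw [hP1, hP2, hP3, ih (m + 1)]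
      have hd : pvS (n + 2) (m + 2)
          = pvS (n + 1) (m + 1) - ((n + 1 : Nat) : Int) * pvS (n + 1) (m + 2) := rfl
      rw [hd]
      push_cast
      ring

-- the shifted sum over k in [m, p+1) equals the full binomial-transform sum pvT p m
lemma pvT_shift (p m : Nat) (h : m ≤ p) :
    ∑ j ∈ Finset.range (p + 1 - m), pvS p (m + j) * (-1 : Int) ^ j * (Nat.choose (m + j) m : Int)
      = pvT p m := by
  unfold pvT
  rw [show Finset.range (p + 1) = Finset.Ico 0 (p + 1) from congrFun Finset.range_eq_Ico _,
    ← Finset.sum_Ico_consecutive _ (Nat.zero_le m) (by omega : m ≤ p + 1)]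
  have h0 : ∑ k ∈ Finset.Ico 0 m, pvS p k * (-1 : Int) ^ (k - m) * (Nat.choose k m : Int) = 0 :=
    Finset.sum_eq_zero (fun k hk => by
      rw [Nat.choose_eq_zero_of_lt (Finset.mem_Ico.mp hk).2]; push_cast; ring)
  rw [h0, zero_add, Finset.sum_Ico_eq_sum_range]
  apply Finset.sum_congr rfl
  intro j _
  rw [show m + j - m = j from by omega]

-- the inner sum of B's row computation equals pvT (n-1) m
lemma innerB (N n m : Nat) (hm : m < n) (hn : n ≤ N) :
    (PySem.List.pyRange ((m : Nat) : Int) ((n : Nat) : Int) 1).foldl (fun acc k =>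
      acc + PySem.List.pyGetD (pvSigRow N (n - 1)) k 0 * (-1) ^ (k - (m : Nat)).toNat
        * PySem.List.pyGetD (PySem.List.pyGetD ((List.range (N + 1)).map pvCRow) k ([] : List Int))
            ((m : Nat) : Int) 0) 0
      = pvT (n - 1) m := by
  rw [PySem.List.foldl_add, zero_add, PySem.List.pyRange_one, List.map_map]
  have ht : (((n : Nat) : Int) - ((m : Nat) : Int)).toNat = n - m := by omega
  rw [ht]
  have hterm : (List.range (n - m)).map ((fun k =>
        PySem.List.pyGetD (pvSigRow N (n - 1)) k 0 * (-1) ^ (k - ((m : Nat) : Int)).toNat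
          * PySem.List.pyGetD
              (PySem.List.pyGetD ((List.range (N + 1)).map pvCRow) k ([] : List Int))
              ((m : Nat) : Int) 0) ∘ (fun k : Nat => ((m : Nat) : Int) + k))
      = (List.range (n - m)).map (fun j =>
          pvS (n - 1) (m + j) * (-1 : Int) ^ j * (Nat.choose (m + j) m : Int)) := by
    apply List.map_congr_left
    intro j hj
    rw [List.mem_range] at hj
    show PySem.List.pyGetD (pvSigRow N (n - 1)) (((m : Nat) : Int) + j) 0
        * (-1) ^ ((((m : Nat) : Int) + j) - ((m : Nat) : Int)).toNat
        * PySem.List.pyGetD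
            (PySem.List.pyGetD ((List.range (N + 1)).map pvCRow) (((m : Nat) : Int) + j)
              ([] : List Int)) ((m : Nat) : Int) 0 = _
    have e2 : ((m : Nat) : Int) + (j : Nat) = ((m + j : Nat) : Int) := by push_cast; ring
    have e3 : ((((m : Nat) : Int) + j) - ((m : Nat) : Int)).toNat = j := by omega
    rw [e3, e2]
    simp only [PySem.List.pyGetD_natCast]
    rw [pvSigRow_getD N (n - 1) (m + j) (by omega)]
    have hC : ((List.range (N + 1)).map pvCRow).getD (m + j) [] = pvCRow (m + j) := by
      rw [List.getD_eq_getElem _ _ (by simp; omega)]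
      simp
    rw [hC, pvCRow_getD (m + j) m (by omega)]
  rw [hterm]
  have hp : n - 1 + 1 - m = n - m := by omega
  have := pvT_shift (n - 1) m (by omega)
  rw [hp] at this
  exact this

-- B's outer fold builds rows 0..m of the signed table
-- B's row construction produces the signed Stirling row n
lemma rowB (N n : Nat) (hn1 : 1 ≤ n) (hn : n ≤ N) :
    [(0 : Int)] ++ (PySem.List.pyRange 0 ((n : Nat) : Int) 1).map (fun m =>
        (PySem.List.pyRange m ((n : Nat) : Int) 1).foldl (fun acc k =>
          acc + PySem.List.pyGetD (pvSigRow N (n - 1)) k 0 * (-1) ^ (k - m).toNat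
            * PySem.List.pyGetD
                (PySem.List.pyGetD ((List.range (N + 1)).map pvCRow) k ([] : List Int)) m 0) 0)
      ++ List.replicate (((N : Int) - ((n : Nat) : Int)).toNat) 0 = pvSigRow N n := by
  rw [PySem.List.pyRange_zero_nat, List.map_map]
  have hmid : (List.range n).map ((fun m =>
        (PySem.List.pyRange m ((n : Nat) : Int) 1).foldl (fun acc k =>
          acc + PySem.List.pyGetD (pvSigRow N (n - 1)) k 0 * (-1) ^ (k - m).toNat
            * PySem.List.pyGetD
                (PySem.List.pyGetD ((List.range (N + 1)).map pvCRow) k ([] : List Int)) m 0) 0)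
        ∘ (fun k : Nat => (k : Int)))
      = (List.range n).map (fun j => pvS n (j + 1)) := by
    apply List.map_congr_left
    intro j hj
    rw [List.mem_range] at hj
    have h1 := innerB N n j hj hn
    show (PySem.List.pyRange ((j : Nat) : Int) ((n : Nat) : Int) 1).foldl _ 0 = _
    rw [h1, pvT_eq (n - 1) j, show n - 1 + 1 = n from by omega]
  rw [hmid]
  have ht : (((N : Int)) - ((n : Nat) : Int)).toNat = N - n := by omega
  rw [ht]
  have hsplit : pvSigRow N n
      = (List.range (n + 1)).map (pvS n) ++ ((List.range (N - n)).map (fun j => n + 1 + j)).map (pvS n) := by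
    rw [pvSigRow, show N + 1 = (n + 1) + (N - n) from by omega, List.range_add, List.map_append,
      List.map_map]
  rw [hsplit]
  have h2 : ((List.range (N - n)).map (fun j => n + 1 + j)).map (pvS n)
      = List.replicate (N - n) 0 := by
    rw [List.map_map]
    apply List.ext_getElem
    · simp
    · intro i h1 h2
      simp only [List.getElem_map, List.getElem_range, List.getElem_replicate, Function.comp]
      exact pvS_big n (n + 1 + i) (by omega)
  rw [h2]
  have h3 : (List.range (n + 1)).map (pvS n) = (0 : Int) :: (List.range n).map (fun j => pvS n (j + 1)) := by
    rw [List.range_succ_eq_map, List.map_cons, List.map_map, pvS_zero_left n hn1]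
    rfl
  rw [h3]
  rfl

lemma pvSigRow_zero (N : Nat) : pvSigRow N 0 = 1 :: List.replicate N 0 := by
  apply List.ext_getElem
  · simp [pvSigRow]
  · intro i h1 h2
    match i with
    | 0 => simp [pvSigRow]; rfl
    | i + 1 =>
      simp only [pvSigRow, List.getElem_map, List.getElem_range, List.getElem_cons_succ,
        List.getElem_replicate]
      exact pvS_big 0 (i + 1) (by omega)

lemma foldB (N : Nat) : ∀ m, m ≤ N →
    (PySem.List.pyRange 1 ((m : Int) + 1) 1).foldl (fun table n =>
      table ++ [[(0 : Int)] ++ (PySem.List.pyRange 0 n 1).map (fun mm =>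
          (PySem.List.pyRange mm n 1).foldl (fun acc k =>
            acc + PySem.List.pyGetD (PySem.List.pyGetD table (-1) ([] : List Int)) k 0
              * (-1) ^ (k - mm).toNat
              * PySem.List.pyGetD
                  (PySem.List.pyGetD ((List.range (N + 1)).map pvCRow) k ([] : List Int)) mm 0) 0)
        ++ List.replicate (((N : Int) - n).toNat) 0])
      [(1 : Int) :: List.replicate N 0] = (List.range (m + 1)).map (pvSigRow N) := by
  intro m
  induction m with
  | zero =>
    intro _
    rw [PySem.List.pyRange_one_eq_nil (by norm_num)]
    simp [pvSigRow_zero]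
  | succ m ih =>
    intro hm
    have ec : ((m + 1 : Nat) : Int) = (m : Int) + 1 := by push_cast; ring
    rw [ec, PySem.List.pyRange_one_succ_right (by omega), List.foldl_append, ih (by omega)]
    simp only [List.foldl_cons, List.foldl_nil]
    have hp : PySem.List.pyGetD ((List.range (m + 1)).map (pvSigRow N)) (-1) ([] : List Int)
        = pvSigRow N m := by
      rw [List.range_succ, List.map_append]
      exact PySem.List.pyGetD_neg_one_append_singleton _ _ _
    rw [hp, ← ec]
    have hr := rowB N (m + 1) (by omega) (by omega)
    simp only [Nat.add_sub_cancel] at hr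
    rw [hr]
    rw [List.range_succ (n := m + 1), List.map_append]
    rfl

lemma pvM_top (N : Nat) : pvM N N = (List.range (N + 1)).map (pvSigRow N) := by
  apply List.map_congr_left
  intro i hi
  rw [List.mem_range] at hi
  rw [if_pos (by omega)]

lemma portB_eq (N : Nat) :
    stirling_first_signed_table_alt (N : Int) = pvM N N := by
  show (if (N : Int) < 0 then _ else _) = _
  rw [if_neg (by omega)]
  simp only []
  rw [pascalC N N (le_refl N)]
  have htn : ((N : Int)).toNat = N := by omega
  rw [htn]
  rw [foldB N N (le_refl N), pvM_top]

-- ===== VERDICT (by name: the statement is the Claim_ definition above) =====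
theorem stirling_first_signed_table_spec : Claim_equal_stirling_first_signed_table := by
  intro n_max _ hpre
  obtain ⟨N, rfl⟩ := Int.eq_ofNat_of_zero_le hpre
  show _ = _
  rw [portA_eq, portB_eq]
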